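-- pv_equiv track=rewrite | github.com/JsonTheRuler/NM-AI | astar-island/client.py | generate_viewport_grid
-- ===== SOURCE A (Python) =====
-- def generate_viewport_grid(map_w: int = 40, map_h: int = 40, vp_size: int = 15) -> list[tuple]:
--     """Generate non-overlapping viewport positions to cover the full map.
--     Returns list of (x, y, w, h) tuples."""
--     viewports = []
--     y = 0
--     while y < map_h:
--         x = 0
--         h = min(vp_size, map_h - y)
--         while x < map_w:
--             w = min(vp_size, map_w - x)
--             viewports.append((x, y, w, h))
--             x += vp_size
--         y += vp_size
--     return viewports
-- ===== SOURCE B (Python) =====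
-- def generate_viewport_grid(map_w: int = 40, map_h: int = 40, vp_size: int = 15) -> list[tuple]:
--     """Closed-form tiling: count tiles per axis by ceiling division, then derive
--     each rectangle arithmetically from its flat index k via divmod (row-major)."""
--     if vp_size <= 0 or map_w <= 0 or map_h <= 0:
--         return []
--     nx = -(-map_w // vp_size)
--     ny = -(-map_h // vp_size)
--
--     def tile(k):
--         j, i = divmod(k, nx)
--         x, y = i * vp_size, j * vp_size
--         w = map_w - x if i == nx - 1 else vp_size
--         h = map_h - y if j == ny - 1 else vp_size
--         return (x, y, w, h)
--
--     return [tile(k) for k in range(nx * ny)]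
-- ===== Notes on version B (the rewrite author's own statement) =====
-- stated objective: alternative
-- what changed: Replaces A's step-and-clamp nested while loops by a closed-form construction: tile counts per axis via ceiling division, then each rectangle derived arithmetically from its flat index by divmod, with the edge size given by a last-index conditional instead of a per-cell min.
import Mathlib
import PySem

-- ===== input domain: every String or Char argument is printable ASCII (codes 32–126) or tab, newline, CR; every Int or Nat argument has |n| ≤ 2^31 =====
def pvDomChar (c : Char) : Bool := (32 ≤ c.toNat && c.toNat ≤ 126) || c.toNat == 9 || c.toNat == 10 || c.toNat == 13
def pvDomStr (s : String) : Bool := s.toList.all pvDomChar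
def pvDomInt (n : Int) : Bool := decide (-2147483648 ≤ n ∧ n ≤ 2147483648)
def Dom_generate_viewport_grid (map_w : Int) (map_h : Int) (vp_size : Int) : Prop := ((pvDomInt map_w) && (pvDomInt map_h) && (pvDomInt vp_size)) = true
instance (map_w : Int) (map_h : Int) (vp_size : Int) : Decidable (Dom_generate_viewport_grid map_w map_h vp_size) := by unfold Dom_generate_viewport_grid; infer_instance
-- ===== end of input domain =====

-- B replaces A's step-and-clamp nested while loops by a closed form: per-axis tile counts by
-- ceiling division, each rectangle derived from its flat index by divmod (alternative, same cost).


-- ===== PORT A =====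
-- inner while loop of A: over x while x < map_w (the vp_size ≤ 0 guard only makes the
-- recursion total; it is untaken on inputs satisfying Pre_, where Python A returns)
def pvInnerA (map_w : Int) (vp_size : Int) (y : Int) (h : Int) (x : Int) :
    List (Int × Int × Int × Int) :=
  if _hx : x < map_w then
    if _hv : vp_size ≤ 0 then []
    else (x, y, min vp_size (map_w - x), h) :: pvInnerA map_w vp_size y h (x + vp_size)
  else []
termination_by (map_w - x).toNat
decreasing_by omega

-- outer while loop of A: over y while y < map_h
def pvOuterA (map_w : Int) (map_h : Int) (vp_size : Int) (y : Int) :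
    List (Int × Int × Int × Int) :=
  if _hy : y < map_h then
    if _hv : vp_size ≤ 0 then []
    else pvInnerA map_w vp_size y (min vp_size (map_h - y)) 0 ++
         pvOuterA map_w map_h vp_size (y + vp_size)
  else []
termination_by (map_h - y).toNat
decreasing_by omega

def generate_viewport_grid (map_w : Int) (map_h : Int) (vp_size : Int) :
    List (Int × Int × Int × Int) :=
  pvOuterA map_w map_h vp_size 0

-- ===== PORT B =====
-- Source B's tile(k): divmod(k, nx), then coordinates and sizes by index arithmetic
def pvTileB (map_w : Int) (map_h : Int) (vp_size : Int) (nx : Int) (ny : Int) (k : Int) :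
    (Int × Int × Int × Int) :=
  let j := PySem.Int.floordiv k nx
  let i := PySem.Int.mod k nx
  let x := i * vp_size
  let y := j * vp_size
  (x, y, (if i = nx - 1 then map_w - x else vp_size),
         (if j = ny - 1 then map_h - y else vp_size))

def generate_viewport_grid_alt (map_w : Int) (map_h : Int) (vp_size : Int) :
    List (Int × Int × Int × Int) :=
  if vp_size ≤ 0 ∨ map_w ≤ 0 ∨ map_h ≤ 0 then []
  else
    let nx := -(PySem.Int.floordiv (-map_w) vp_size)
    let ny := -(PySem.Int.floordiv (-map_h) vp_size)
    (PySem.List.pyRange 0 (nx * ny) 1).map (pvTileB map_w map_h vp_size nx ny)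

-- ===== PRECONDITION & SPEC =====
-- Pre_ excludes exactly the inputs where Python A DIVERGES (never returns): vp_size ≤ 0 with
-- map_h > 0 makes A's outer while loop spin forever. On every input A returns, Pre_ holds.
def Pre_generate_viewport_grid (map_w : Int) (map_h : Int) (vp_size : Int) : Prop :=
  0 < vp_size ∨ map_h ≤ 0
instance (map_w : Int) (map_h : Int) (vp_size : Int) : Decidable (Pre_generate_viewport_grid map_w map_h vp_size) := by unfold Pre_generate_viewport_grid; infer_instance
def pvWitness_generate_viewport_grid : Int × Int × Int := (40, 40, 15)

def Spec_generate_viewport_grid (map_w : Int) (map_h : Int) (vp_size : Int) (out : List (Int × Int × Int × Int)) : Prop := out = generate_viewport_grid_alt map_w map_h vp_size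
instance (map_w : Int) (map_h : Int) (vp_size : Int) (out : List (Int × Int × Int × Int)) : Decidable (Spec_generate_viewport_grid map_w map_h vp_size out) := by unfold Spec_generate_viewport_grid; infer_instance

-- ===== CLAIM (what is proved, stated in full; the proofs are below) =====
def Claim_equal_generate_viewport_grid : Prop := ∀ (map_w : Int) (map_h : Int) (vp_size : Int), Dom_generate_viewport_grid map_w map_h vp_size → Pre_generate_viewport_grid map_w map_h vp_size → Spec_generate_viewport_grid map_w map_h vp_size (generate_viewport_grid map_w map_h vp_size)

-- ===== LEMMAS AND PROOFS =====

-- proof-side intermediate form: the 1-D list of (start, size) segments of a stepped scan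
def pvSeg (vp_size : Int) (total : Int) (s : Int) : List (Int × Int) :=
  if _hs : s < total then
    if _hv : vp_size ≤ 0 then []
    else (s, min vp_size (total - s)) :: pvSeg vp_size total (s + vp_size)
  else []
termination_by (total - s).toNat
decreasing_by omega

theorem pvSeg_unfold (vp_size total s : Int) :
    pvSeg vp_size total s =
      if s < total then
        (if vp_size ≤ 0 then []
         else (s, min vp_size (total - s)) :: pvSeg vp_size total (s + vp_size))
      else [] := by
  rw [pvSeg]; split_ifs <;> rfl

-- A's inner loop is the mapped x-segments
theorem pvInnerA_eq_seg (map_w vp_size y h x : Int) :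
    pvInnerA map_w vp_size y h x =
      (pvSeg vp_size map_w x).map (fun xw => (xw.1, y, xw.2, h)) := by
  fun_induction pvInnerA map_w vp_size y h x with
  | case1 x hx hv => rw [pvSeg_unfold vp_size map_w x]; simp [hx, hv]
  | case2 x hx hv ih => rw [pvSeg_unfold vp_size map_w x]; simp [hx, hv, ih]
  | case3 x hx => rw [pvSeg_unfold vp_size map_w x]; simp [hx]

-- A's outer loop is the flatMap over the y-segments
theorem pvOuterA_eq_flatMap (map_w map_h vp_size y : Int) :
    pvOuterA map_w map_h vp_size y =
      (pvSeg vp_size map_h y).flatMap (fun yh =>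
        (pvSeg vp_size map_w 0).map (fun xw => (xw.1, yh.1, xw.2, yh.2))) := by
  fun_induction pvOuterA map_w map_h vp_size y with
  | case1 y hy hv => rw [pvSeg_unfold vp_size map_h y]; simp [hy, hv]
  | case2 y hy hv ih =>
      rw [pvSeg_unfold vp_size map_h y]; simp [hy, hv, ih, pvInnerA_eq_seg]
  | case3 y hy => rw [pvSeg_unfold vp_size map_h y]; simp [hy]

-- ceiling-count characterisation: number of segments left from s is ceil((total-s)/vp)
theorem pvSeg_eq_range (vp_size total : Int) (hv : 0 < vp_size) (s : Int) :
    pvSeg vp_size total s =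
      (List.range ((-(PySem.Int.floordiv (-(total - s)) vp_size)).toNat)).map
        (fun (t : Nat) => (s + (t : Int) * vp_size, min vp_size (total - s - (t : Int) * vp_size))) := by
  fun_induction pvSeg vp_size total s with
  | case1 s hs hvle => exact absurd hv (by omega)
  | case2 s hs hvle ih =>
      have hqc : (-(PySem.Int.floordiv (-(total - s)) vp_size) - 1) * vp_size < total - s ∧
          total - s ≤ -(PySem.Int.floordiv (-(total - s)) vp_size) * vp_size :=
        (PySem.Int.neg_floordiv_neg_eq_iff_of_pos hv).mp rfl
      set q : Int := -(PySem.Int.floordiv (-(total - s)) vp_size) with hqdef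
      have hq1 : 1 ≤ q := by nlinarith [hqc.1, hqc.2]
      have hqprev : -(PySem.Int.floordiv (-(total - (s + vp_size))) vp_size) = q - 1 :=
        (PySem.Int.neg_floordiv_neg_eq_iff_of_pos hv).mpr ⟨by nlinarith [hqc.1], by nlinarith [hqc.2]⟩
      rw [hqprev] at ih
      have hqt : q.toNat = (q - 1).toNat + 1 := by omega
      rw [ih, hqt, List.range_succ_eq_map, List.map_cons, List.map_map]
      congr 1
      · simp
      · refine List.map_congr_left ?_
        intro t _
        simp only [Function.comp, Nat.succ_eq_add_one]
        push_cast
        refine Prod.ext ?_ ?_ <;> simp <;> ring_nf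
  | case3 s hs =>
      have hqc : (-(PySem.Int.floordiv (-(total - s)) vp_size) - 1) * vp_size < total - s ∧
          total - s ≤ -(PySem.Int.floordiv (-(total - s)) vp_size) * vp_size :=
        (PySem.Int.neg_floordiv_neg_eq_iff_of_pos hv).mp rfl
      have hq0 : -(PySem.Int.floordiv (-(total - s)) vp_size) ≤ 0 := by nlinarith [hqc.1]
      rw [Int.toNat_of_nonpos hq0]
      simp

-- edge-tile size: the per-cell min equals the last-index conditional when n = ceil(total/vp)
theorem pv_min_ite (vp total n : Int) (hv : 0 < vp)
    (hn : -(PySem.Int.floordiv (-total) vp) = n) (i : Int) (hi : i < n) :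
    min vp (total - i * vp) = if i = n - 1 then total - i * vp else vp := by
  have hc := (PySem.Int.neg_floordiv_neg_eq_iff_of_pos hv).mp hn
  by_cases he : i = n - 1
  · rw [if_pos he, he, min_eq_right (by nlinarith [hc.2])]
  · have hi2 : i ≤ n - 2 := by omega
    rw [if_neg he, min_eq_left (by nlinarith [hc.1, mul_le_mul_of_nonneg_right hi2 (le_of_lt hv)])]

-- splitting a flat row-major index into (row, col)
theorem pv_flat_split {α : Type} (nxN : Nat) (hnx : 0 < nxN) (g : Nat → Nat → α) (nyN : Nat) :
    (List.range (nyN * nxN)).map (fun k => g (k / nxN) (k % nxN)) =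
      (List.range nyN).flatMap (fun j => (List.range nxN).map (g j)) := by
  induction nyN with
  | zero => simp
  | succ n ih =>
      rw [Nat.succ_mul, List.range_add, List.map_append, ih]
      rw [List.range_succ, List.flatMap_append]
      simp only [List.map_map, List.flatMap_cons, List.flatMap_nil, List.append_nil]
      congr 1
      refine List.map_congr_left ?_
      intro t ht
      have ht' := List.mem_range.mp ht
      simp only [Function.comp]
      rw [Nat.mul_comm n nxN, Nat.mul_add_div hnx, Nat.mul_add_mod,
          Nat.div_eq_of_lt ht', Nat.mod_eq_of_lt ht', Nat.add_zero]

-- ===== VERDICT (by name: the statement is the Claim_ definition above) =====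
theorem generate_viewport_grid_spec : Claim_equal_generate_viewport_grid := by
  intro map_w map_h vp_size _ hpre
  unfold Spec_generate_viewport_grid generate_viewport_grid generate_viewport_grid_alt
  rw [pvOuterA_eq_flatMap]
  by_cases hvle : vp_size ≤ 0
  · have hh : map_h ≤ 0 := hpre.resolve_left (by omega)
    have h0 : pvSeg vp_size map_h 0 = [] := by
      rw [pvSeg_unfold]; simp [show ¬ (0:Int) < map_h by omega]
    rw [h0, if_pos (Or.inl hvle)]
    simp
  · have hv : 0 < vp_size := by omega
    by_cases hh : map_h ≤ 0
    · have : pvSeg vp_size map_h 0 = [] := by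
        rw [pvSeg_unfold]; simp [show ¬ (0:Int) < map_h by omega]
      rw [this, if_pos (Or.inr (Or.inr hh))]
      simp
    · by_cases hw : map_w ≤ 0
      · have : pvSeg vp_size map_w 0 = [] := by
          rw [pvSeg_unfold]; simp [show ¬ (0:Int) < map_w by omega]
        rw [this, if_pos (Or.inr (Or.inl hw))]
        simp
      · -- main case: 0 < vp_size, 0 < map_w, 0 < map_h
        rw [if_neg (by omega)]
        have hcw : (-(PySem.Int.floordiv (-map_w) vp_size) - 1) * vp_size < map_w ∧
            map_w ≤ -(PySem.Int.floordiv (-map_w) vp_size) * vp_size :=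
          (PySem.Int.neg_floordiv_neg_eq_iff_of_pos hv).mp rfl
        have hch : (-(PySem.Int.floordiv (-map_h) vp_size) - 1) * vp_size < map_h ∧
            map_h ≤ -(PySem.Int.floordiv (-map_h) vp_size) * vp_size :=
          (PySem.Int.neg_floordiv_neg_eq_iff_of_pos hv).mp rfl
        set nxI : Int := -(PySem.Int.floordiv (-map_w) vp_size) with hnxdef
        set nyI : Int := -(PySem.Int.floordiv (-map_h) vp_size) with hnydef
        have hnx1 : 1 ≤ nxI := by nlinarith [hcw.1, hcw.2]
        have hny1 : 1 ≤ nyI := by nlinarith [hch.1, hch.2]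
        have hmul : (nxI * nyI).toNat = nyI.toNat * nxI.toNat := by
          rw [mul_comm]; exact Int.toNat_mul (by omega) (by omega)
        show _ = List.map (pvTileB map_w map_h vp_size nxI nyI)
            (PySem.List.pyRange 0 (nxI * nyI) 1)
        -- both sides to flat row-major maps over List.range
        rw [pvSeg_eq_range vp_size map_h hv 0, pvSeg_eq_range vp_size map_w hv 0,
            PySem.List.pyRange_one, List.flatMap_map]
        simp only [sub_zero, zero_add, List.map_map, Function.comp_def, hmul]
        rw [← hnxdef, ← hnydef]
        rw [← pv_flat_split nxI.toNat (by omega)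
              (fun j i => ((i : Int) * vp_size, (j : Int) * vp_size,
                min vp_size (map_w - (i : Int) * vp_size),
                min vp_size (map_h - (j : Int) * vp_size))) nyI.toNat]
        refine List.map_congr_left ?_
        intro k hk
        have hk' := List.mem_range.mp hk
        have hnxpos : 0 < nxI.toNat := by omega
        have hjlt : k / nxI.toNat < nyI.toNat := Nat.div_lt_of_lt_mul (Nat.mul_comm nyI.toNat nxI.toNat ▸ hk')
        have hilt : k % nxI.toNat < nxI.toNat := Nat.mod_lt _ hnxpos
        have hnxcast : ((nxI.toNat : Int)) = nxI := Int.toNat_of_nonneg (by omega)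
        simp only [pvTileB]
        rw [show PySem.Int.floordiv (k : Int) nxI = ((k / nxI.toNat : Nat) : Int) by
              rw [← hnxcast]; exact PySem.Int.floordiv_natCast k nxI.toNat,
            show PySem.Int.mod (k : Int) nxI = ((k % nxI.toNat : Nat) : Int) by
              rw [← hnxcast]; exact PySem.Int.mod_natCast k nxI.toNat]
        rw [pv_min_ite vp_size map_w nxI hv hnxdef.symm ((k % nxI.toNat : Nat) : Int) (by omega),
            pv_min_ite vp_size map_h nyI hv hnydef.symm ((k / nxI.toNat : Nat) : Int) (by omega)]
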